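-- pv_equiv track=rewrite | github.com/ydb-platform/ydb | contrib/python/ezdxf/ezdxf/fonts/lff.py | scan_int_ex
-- ===== SOURCE A (Python) =====
-- def scan_int_ex(s: str) -> int:
--     from string import hexdigits
--
--     if len(s) == 0:
--         return 0
--     try:
--         end = s.index("]")
--     except ValueError:
--         end = len(s)
--     s = s[1:end].lower()
--     s = "".join(c for c in s if c in hexdigits)
--     try:
--         return int(s, 16)
--     except ValueError:
--         return 0
-- ===== SOURCE B (Python) =====
-- _HEX = {"0": 0, "1": 1, "2": 2, "3": 3, "4": 4, "5": 5, "6": 6, "7": 7,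
--         "8": 8, "9": 9, "a": 10, "b": 11, "c": 12, "d": 13, "e": 14, "f": 15}
--
--
-- def scan_int_ex(s: str) -> int:
--     if not s:
--         return 0
--     end = s.find("]")
--     if end < 0:
--         end = len(s)
--     value = 0
--     for ch in s[1:end]:
--         d = _HEX.get(ch.lower())
--         if d is not None:
--             value = value * 16 + d
--     return value
-- ===== Notes on version B (the rewrite author's own statement) =====
-- stated objective: simpler
-- what changed: B replaces A's pipeline (find ']' via index under try/except, filter hex chars into a new lowered string, then int(s,16) under another try/except) with a single accumulator pass over s[1:end]: each character is lowered and looked up in a hex-value dict and folded as value = value*16 + d, skipping non-hex characters; no intermediate string and no exception handling.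
import Mathlib
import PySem

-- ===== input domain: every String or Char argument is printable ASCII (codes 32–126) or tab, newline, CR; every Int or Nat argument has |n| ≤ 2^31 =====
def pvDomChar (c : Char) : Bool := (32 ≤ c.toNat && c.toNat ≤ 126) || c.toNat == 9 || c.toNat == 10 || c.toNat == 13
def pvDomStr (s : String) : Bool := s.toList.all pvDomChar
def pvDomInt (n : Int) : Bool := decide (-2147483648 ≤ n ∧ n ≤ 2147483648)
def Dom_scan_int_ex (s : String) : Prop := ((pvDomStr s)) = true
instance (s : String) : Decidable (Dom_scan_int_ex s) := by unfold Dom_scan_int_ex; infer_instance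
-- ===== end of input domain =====

-- B replaces A's filter-into-a-string-then-int(s,16) (with two try/excepts) by one accumulator
-- pass over s[1:end] with a hex-value dict: value = value*16 + d, skipping non-hex characters
-- (objective: simpler).

-- ===== PORT A =====

-- string.hexdigits
def pvHexdigits : List Char :=
  ['0', '1', '2', '3', '4', '5', '6', '7', '8', '9',
   'a', 'b', 'c', 'd', 'e', 'f', 'A', 'B', 'C', 'D', 'E', 'F']

-- int(cs, 16) ported by hand (PySem.Int.ofCharsBase? exists, but its digit-fold helper is private,
-- so nothing could be proved about it); exact on the strings A applies it to — strings whose every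
-- character is one of "0123456789abcdef" (and any string of base-16 digit characters): the digit
-- fold, none (= ValueError) on "", on a non-digit or on a digit ≥ 16.
def pvIntBase16? (cs : List Char) : Option Int :=
  if cs.isEmpty then none
  else
    cs.foldl
      (fun a? c =>
        match a?, PySem.Int.digitVal? c with
        | some a, some d => if d < 16 then some (a * 16 + (d : Int)) else none
        | _, _ => none)
      (some 0)

def scan_int_ex (s : String) : Int :=
  if s.toList.length = 0 then 0
  else
    let cs := s.toList
    -- try: end = s.index("]") / except ValueError: end = len(s)
    let f := PySem.Chars.find cs [']']
    let endI : Int := if f = -1 then (cs.length : Int) else f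
    -- s = s[1:end].lower()
    let body := PySem.Chars.lower (PySem.List.slice cs (some 1) (some endI))
    -- s = "".join(c for c in s if c in hexdigits)   ('c in hexdigits' for the 1-char c is membership)
    let filtered := body.filter (fun c => pvHexdigits.contains c)
    -- try: return int(s, 16) / except ValueError: return 0
    match pvIntBase16? filtered with
    | some n => n
    | none => 0

-- ===== PORT B =====

-- _HEX
def pvHexTable : PySem.Dict Char Int :=
  PySem.Dict.mk [('0', 0), ('1', 1), ('2', 2), ('3', 3), ('4', 4), ('5', 5), ('6', 6), ('7', 7),
                 ('8', 8), ('9', 9), ('a', 10), ('b', 11), ('c', 12), ('d', 13), ('e', 14), ('f', 15)]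

def scan_int_ex_alt (s : String) : Int :=
  if s.toList.isEmpty then 0
  else
    let cs := s.toList
    let f := PySem.Chars.find cs [']']          -- end = s.find("]")
    let e : Nat := if f < 0 then cs.length else f.toNat
    -- for ch in s[1:end]: d = _HEX.get(ch.lower()); if d is not None: value = value*16 + d
    ((cs.drop 1).take (e - 1)).foldl
      (fun value c =>
        match PySem.Dict.get? pvHexTable (PySem.Chars.lowerChar c) with
        | some d => value * 16 + d
        | none => value)
      0

-- ===== PRECONDITION & SPEC =====
def Spec_scan_int_ex (s : String) (out : Int) : Prop := out = scan_int_ex_alt s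
instance (s : String) (out : Int) : Decidable (Spec_scan_int_ex s out) := by unfold Spec_scan_int_ex; infer_instance

-- ===== CLAIM (what is proved, stated in full; the proofs are below) =====
def Claim_equal_scan_int_ex : Prop := ∀ (s : String), Dom_scan_int_ex s → Spec_scan_int_ex s (scan_int_ex s)

-- ===== LEMMAS AND PROOFS =====

-- lowerChar never yields an uppercase letter
theorem pv_lower_not_upper (c u : Char) (hu : 'A' ≤ u ∧ u ≤ 'Z') : PySem.Chars.lowerChar c ≠ u := by
  have hA : 65 ≤ u.toNat ∧ u.toNat ≤ 90 := by
    obtain ⟨h1, h2⟩ := hu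
    rw [Char.le_def] at h1 h2
    exact ⟨h1, h2⟩
  unfold PySem.Chars.lowerChar
  split
  · rename_i h
    simp only [PySem.Chars.isupper, Bool.and_eq_true, decide_eq_true_eq, Char.le_def] at h
    intro he
    have h1 : (Char.ofNat (c.toNat + 32)).toNat = u.toNat := by rw [he]
    rw [Char.toNat_ofNat] at h1
    have hv : (c.toNat + 32).isValidChar := by
      left
      have := h.2
      change c.toNat ≤ 90 at this
      omega
    rw [if_pos hv] at h1
    have := h.1
    change 65 ≤ c.toNat at this
    omega
  · rename_i h
    simp only [PySem.Chars.isupper, Bool.and_eq_true, decide_eq_true_eq, not_and_or] at h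
    intro he; subst he
    obtain ⟨h1, h2⟩ := hu
    rw [Char.le_def] at h1 h2
    rcases h with h | h <;> exact absurd (by assumption) h

def pvLow16 : List Char :=
  ['0', '1', '2', '3', '4', '5', '6', '7', '8', '9', 'a', 'b', 'c', 'd', 'e', 'f']

-- the per-character step equality between A's filtered hex fold and B's dict fold
theorem pv_step_eq (v : Int) (d : Char) (hnu : ¬ ('A' ≤ d ∧ d ≤ 'Z')) :
    (if pvHexdigits.contains d then
       v * 16 + (((PySem.Int.digitVal? d).getD 0 : Nat) : Int)
     else v)
    = (match PySem.Dict.get? pvHexTable d with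
       | some dv => v * 16 + dv
       | none => v) := by
  by_cases hmem : d ∈ pvLow16
  · fin_cases hmem <;> rfl
  · have hupper : ∀ u ∈ pvHexdigits, u ∉ pvLow16 → ('A' ≤ u ∧ u ≤ 'Z') := by
      intro u hu
      fin_cases hu <;> decide
    have hcon : pvHexdigits.contains d = false := by
      rw [List.contains_eq_mem, decide_eq_false_iff_not]
      intro hm
      exact hnu (hupper _ hm hmem)
    have hget : PySem.Dict.get? pvHexTable d = none := by
      have hk : ∀ x ∈ pvHexTable.items, x.1 ∈ pvLow16 := by
        intro x hx
        fin_cases hx <;> decide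
      simp only [PySem.Dict.get?, Option.map_eq_none_iff, List.find?_eq_none, beq_iff_eq]
      intro x hx heq
      exact hmem (heq ▸ hk x hx)
    rw [hcon, hget]
    simp

-- Chars.find.go returns -1 or a natural number
theorem pv_find_go_cases (sub s : List Char) (k : Nat) :
    PySem.Chars.find.go sub s k = -1 ∨ ∃ n : Nat, PySem.Chars.find.go sub s k = (n : Int) := by
  induction s generalizing k with
  | nil =>
    simp only [PySem.Chars.find.go]
    split
    · exact Or.inr ⟨k, rfl⟩
    · exact Or.inl rfl
  | cons h t ih =>
    simp only [PySem.Chars.find.go]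
    split
    · exact Or.inr ⟨k, rfl⟩
    · exact ih (k + 1)

theorem pv_find_cases (s : List Char) (sub : List Char) :
    PySem.Chars.find s sub = -1 ∨ ∃ n : Nat, PySem.Chars.find s sub = (n : Int) := by
  unfold PySem.Chars.find
  exact pv_find_go_cases sub s 0

-- every hexdigit has a digit value below 16
theorem pv_digitVal_lt (u : Char) (hu : u ∈ pvHexdigits) :
    ∃ dd : Nat, PySem.Int.digitVal? u = some dd ∧ dd < 16 := by
  fin_cases hu <;> exact ⟨_, rfl, by decide⟩

-- A's optional hex fold never fails on hexdigit characters
theorem pv_parse_fold (cs : List Char) (h : ∀ c ∈ cs, c ∈ pvHexdigits) (a : Int) :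
    cs.foldl
      (fun a? c =>
        match a?, PySem.Int.digitVal? c with
        | some a, some d => if d < 16 then some (a * 16 + (d : Int)) else none
        | _, _ => none)
      (some a)
    = some (cs.foldl (fun v c => v * 16 + (((PySem.Int.digitVal? c).getD 0 : Nat) : Int)) a) := by
  induction cs generalizing a with
  | nil => rfl
  | cons c t ih =>
    obtain ⟨dd, hdd, hlt⟩ := pv_digitVal_lt c (h c (List.mem_cons_self))
    simp only [List.foldl_cons, hdd, if_pos hlt, Option.getD_some]
    exact ih (fun x hx => h x (List.mem_cons_of_mem _ hx)) _

-- A's try: int(s,16) / except: 0 on a filtered hexdigit string is the plain hex fold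
theorem pv_parse (cs : List Char) (h : ∀ c ∈ cs, c ∈ pvHexdigits) :
    (match pvIntBase16? cs with
     | some n => n
     | none => 0)
    = cs.foldl (fun v c => v * 16 + (((PySem.Int.digitVal? c).getD 0 : Nat) : Int)) 0 := by
  cases cs with
  | nil => rfl
  | cons c t =>
    unfold pvIntBase16?
    rw [pv_parse_fold _ h 0]
    simp only [List.isEmpty_cons, Bool.false_eq_true, if_false]

-- A's filtered fold over the lowered body equals B's dict fold over the raw body
theorem pv_body_eq (L : List Char) :
    ((PySem.Chars.lower L).filter (fun c => pvHexdigits.contains c)).foldl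
      (fun v c => v * 16 + (((PySem.Int.digitVal? c).getD 0 : Nat) : Int)) 0
    = L.foldl
        (fun v c =>
          match PySem.Dict.get? pvHexTable (PySem.Chars.lowerChar c) with
          | some d => v * 16 + d
          | none => v)
        0 := by
  rw [List.foldl_filter]
  simp only [PySem.Chars.lower]
  rw [List.foldl_map]
  congr 1
  funext v c
  have hnu : ¬ ('A' ≤ PySem.Chars.lowerChar c ∧ PySem.Chars.lowerChar c ≤ 'Z') := by
    intro hx
    exact pv_lower_not_upper c _ hx rfl
  exact pv_step_eq v (PySem.Chars.lowerChar c) hnu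

theorem pv_filtered_mem (L : List Char) :
    ∀ c ∈ (PySem.Chars.lower L).filter (fun c => pvHexdigits.contains c), c ∈ pvHexdigits := by
  intro c hc
  have := List.of_mem_filter hc
  simpa using this

-- s[1:n] as drop/take (PySem.List.slice_natCast with the Int literal 1 normalised)
theorem pv_slice_one (xs : List Char) (n : Nat) :
    PySem.List.slice xs (some 1) (some (n : Int)) = (xs.drop 1).take (n - 1) := by
  have h := PySem.List.slice_natCast xs 1 n
  simpa using h

-- ===== VERDICT (by name: the statement is the Claim_ definition above) =====
theorem scan_int_ex_spec : Claim_equal_scan_int_ex := by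
  intro s _
  unfold Spec_scan_int_ex scan_int_ex scan_int_ex_alt
  dsimp only []
  by_cases hnil : s.toList.length = 0
  · have hl : s.toList = [] := List.length_eq_zero_iff.mp hnil
    rw [if_pos hnil, if_pos (by rw [hl]; rfl)]
  · have hBe : ¬ (s.toList.isEmpty = true) := by
      rw [List.isEmpty_iff]
      intro h
      exact hnil (by rw [h]; rfl)
    rw [if_neg hnil, if_neg hBe]
    rw [pv_parse _ (pv_filtered_mem _)]
    set f := PySem.Chars.find s.toList [']'] with hfd
    rcases pv_find_cases s.toList [']'] with hf | ⟨n, hf⟩ <;> rw [← hfd] at hf <;> rw [hf]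
    · rw [if_pos rfl, if_pos (by norm_num : (-1 : Int) < 0), pv_slice_one, pv_body_eq]
    · rw [if_neg (by omega : ¬ ((n : Int) = -1)), if_neg (by omega : ¬ ((n : Int) < 0)),
        Int.toNat_natCast, pv_slice_one, pv_body_eq]
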